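-- pv_equiv track=rewrite | github.com/anhhominh/python_3.11.3 | sorted_yes_no_how.py | is_sorted_and_how
-- ===== SOURCE A (Python) =====
-- def is_sorted_and_how(arr):
--     check_1 = False
--     check_2 = False
--     # yes, ascending
--     for i in range(0,len(arr)-1):
--         for j in range(i+1,len(arr)):
--             if arr[i] > arr[j]:
--                 check_1 = True
--                 break
--     for i in range(0,len(arr)-1):
--         for j in range(i+1,len(arr)):
--             if arr[i] < arr[j]:
--                 check_2 = True
--                 break
--     if check_1 == False and check_2 == True:
--         return 'yes, ascending'
--     elif check_1 == True and check_2 == False: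
--         return 'yes, descending'
--     else:
--         return 'no'
-- ===== SOURCE B (Python) =====
-- def is_sorted_and_how(arr):
--     has_gt = False  # some adjacent strict decrease
--     has_lt = False  # some adjacent strict increase
--     for a, b in zip(arr, arr[1:]):
--         if a > b:
--             has_gt = True
--         if a < b:
--             has_lt = True
--     if not has_gt and has_lt:
--         return 'yes, ascending'
--     if has_gt and not has_lt:
--         return 'yes, descending'
--     return 'no'
-- ===== Notes on version B (the rewrite author's own statement) =====
-- stated objective: faster
-- what changed: Replaced the two quadratic all-pairs scans with one linear pass over adjacent pairs, using that a violating pair exists iff a violating adjacent pair exists.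
import Mathlib
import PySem

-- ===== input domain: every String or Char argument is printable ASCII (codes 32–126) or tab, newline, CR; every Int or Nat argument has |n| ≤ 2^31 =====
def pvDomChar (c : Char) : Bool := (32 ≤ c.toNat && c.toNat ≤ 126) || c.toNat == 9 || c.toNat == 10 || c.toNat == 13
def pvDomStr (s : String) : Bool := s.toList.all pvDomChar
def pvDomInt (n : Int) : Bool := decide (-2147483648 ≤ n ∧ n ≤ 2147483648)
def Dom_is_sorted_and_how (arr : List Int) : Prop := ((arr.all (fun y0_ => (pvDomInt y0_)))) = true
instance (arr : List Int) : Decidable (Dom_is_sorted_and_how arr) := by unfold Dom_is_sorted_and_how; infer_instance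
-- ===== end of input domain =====

-- B replaces A's two quadratic all-pairs scans by one linear pass over adjacent pairs (same return value for every input).

-- ===== PORT A =====
-- inner loop 'for j in range(i+1, len(arr)): if arr[i] > arr[j]: check_1 = True; break'
def pvInnerGT (arr : List Int) (ai : Int) : List Int → Bool
  | [] => false
  | j :: js => if ai > PySem.List.pyGetD arr j 0 then true else pvInnerGT arr ai js

def pvInnerLT (arr : List Int) (ai : Int) : List Int → Bool
  | [] => false
  | j :: js => if ai < PySem.List.pyGetD arr j 0 then true else pvInnerLT arr ai js

def is_sorted_and_how (arr : List Int) : String :=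
  let n : Int := arr.length
  let check1 := (PySem.List.pyRange 0 (n - 1) 1).foldl
    (fun check i =>
      if pvInnerGT arr (PySem.List.pyGetD arr i 0) (PySem.List.pyRange (i + 1) n 1) then true
      else check) false
  let check2 := (PySem.List.pyRange 0 (n - 1) 1).foldl
    (fun check i =>
      if pvInnerLT arr (PySem.List.pyGetD arr i 0) (PySem.List.pyRange (i + 1) n 1) then true
      else check) false
  if check1 == false && check2 == true then "yes, ascending"
  else if check1 == true && check2 == false then "yes, descending"
  else "no"

-- ===== PORT B =====
def is_sorted_and_how_alt (arr : List Int) : String :=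
  let pairs := arr.zip (PySem.List.slice arr (some 1) none)   -- zip(arr, arr[1:])
  let flags := pairs.foldl
    (fun (s : Bool × Bool) p => (s.1 || decide (p.1 > p.2), s.2 || decide (p.1 < p.2)))
    (false, false)
  if !flags.1 && flags.2 then "yes, ascending"
  else if flags.1 && !flags.2 then "yes, descending"
  else "no"

-- ===== PRECONDITION & SPEC =====
def Spec_is_sorted_and_how (arr : List Int) (out : String) : Prop := out = is_sorted_and_how_alt arr
instance (arr : List Int) (out : String) : Decidable (Spec_is_sorted_and_how arr out) := by unfold Spec_is_sorted_and_how; infer_instance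

-- ===== CLAIM (what is proved, stated in full; the proofs are below) =====
def Claim_equal_is_sorted_and_how : Prop := ∀ (arr : List Int), Dom_is_sorted_and_how arr → Spec_is_sorted_and_how arr (is_sorted_and_how arr)

-- ===== LEMMAS AND PROOFS =====

-- A's 'set flag and break' inner loop is an existence scan
theorem pvInnerGT_eq_any (arr : List Int) (ai : Int) (js : List Int) :
    pvInnerGT arr ai js = js.any (fun j => decide (ai > PySem.List.pyGetD arr j 0)) := by
  induction js with
  | nil => rfl
  | cons j js ih =>
    simp only [pvInnerGT, List.any_cons, ih]
    by_cases h : ai > PySem.List.pyGetD arr j 0 <;> simp [h]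

theorem pvInnerLT_eq_any (arr : List Int) (ai : Int) (js : List Int) :
    pvInnerLT arr ai js = js.any (fun j => decide (ai < PySem.List.pyGetD arr j 0)) := by
  induction js with
  | nil => rfl
  | cons j js ih =>
    simp only [pvInnerLT, List.any_cons, ih]
    by_cases h : ai < PySem.List.pyGetD arr j 0 <;> simp [h]

-- A's outer 'if found then flag := true' fold is an existence scan
theorem pvFoldIfOr (f : Int → Bool) (l : List Int) (b : Bool) :
    l.foldl (fun c i => if f i then true else c) b = (b || l.any f) := by
  induction l generalizing b with
  | nil => simp
  | cons x xs ih =>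
    simp only [List.foldl_cons, List.any_cons, ih]
    by_cases h : f x <;> simp [h]

-- B's two-flag fold is a pair of existence scans
theorem pvFoldPairOr (f g : Int × Int → Bool) (l : List (Int × Int)) (b1 b2 : Bool) :
    l.foldl (fun (s : Bool × Bool) p => (s.1 || f p, s.2 || g p)) (b1, b2)
      = (b1 || l.any f, b2 || l.any g) := by
  induction l generalizing b1 b2 with
  | nil => simp
  | cons x xs ih =>
    simp only [List.foldl_cons, List.any_cons, ih, Bool.or_assoc]

-- adjacent-pair scan detects exactly a broken chain
theorem pvZipAnyIff (r : Int → Int → Bool) (R : Int → Int → Prop) [DecidableRel R]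
    (hr : ∀ a b, r a b = true ↔ ¬ R a b) (l : List Int) :
    ((l.zip (l.drop 1)).any (fun p => r p.1 p.2) = true) ↔ ¬ l.IsChain R := by
  induction l with
  | nil => simp
  | cons a t ih =>
    cases t with
    | nil => simp
    | cons b t =>
      simp only [List.drop_one, List.tail_cons, List.zip_cons_cons, List.any_cons,
        List.isChain_cons_cons, Bool.or_eq_true]
      have ih' : ((b :: t).zip (t)).any (fun p => r p.1 p.2) = true ↔ ¬ (b :: t).IsChain R := by
        simpa using ih
      rw [hr, ih']
      by_cases h1 : R a b <;> by_cases h2 : (b :: t).IsChain R <;> simp [h1, h2]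

-- the all-pairs scan detects exactly a broken Pairwise
theorem pvQuadAnyIff (r : Int → Int → Bool) (R : Int → Int → Prop) [DecidableRel R]
    (hr : ∀ a b, r a b = true ↔ ¬ R a b) (l : List Int) :
    ((PySem.List.pyRange 0 ((l.length : Int) - 1) 1).any (fun i =>
      (PySem.List.pyRange (i + 1) (l.length : Int) 1).any (fun j =>
        r (PySem.List.pyGetD l i 0) (PySem.List.pyGetD l j 0))) = true) ↔ ¬ l.Pairwise R := by
  rw [List.pairwise_iff_getElem]
  push Not
  simp only [List.any_eq_true, PySem.List.mem_pyRange_one]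
  constructor
  · rintro ⟨i, ⟨hi0, hi1⟩, j, ⟨hj0, hj1⟩, hrij⟩
    rw [hr] at hrij
    have hil : i.toNat < l.length := by omega
    have hjl : j.toNat < l.length := by omega
    refine ⟨i.toNat, j.toNat, hil, hjl, by omega, ?_⟩
    rwa [PySem.List.pyGetD_of_nonneg l 0 hi0, PySem.List.pyGetD_of_nonneg l 0 (by omega : (0:Int) ≤ j),
      List.getD_eq_getElem l 0 hil, List.getD_eq_getElem l 0 hjl] at hrij
  · rintro ⟨i, j, hil, hjl, hij, hnR⟩
    refine ⟨(i : Int), ⟨by omega, by omega⟩, (j : Int), ⟨by omega, by omega⟩, ?_⟩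
    rw [hr, PySem.List.pyGetD_of_nonneg l 0 (by omega), PySem.List.pyGetD_of_nonneg l 0 (by omega),
      Int.toNat_natCast, Int.toNat_natCast, List.getD_eq_getElem l 0 hil, List.getD_eq_getElem l 0 hjl]
    exact hnR

theorem pvCheckEq (r : Int → Int → Bool) (R : Int → Int → Prop) [DecidableRel R] [IsTrans Int R]
    (hr : ∀ a b, r a b = true ↔ ¬ R a b) (l : List Int) :
    ((PySem.List.pyRange 0 ((l.length : Int) - 1) 1).any (fun i =>
      (PySem.List.pyRange (i + 1) (l.length : Int) 1).any (fun j =>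
        r (PySem.List.pyGetD l i 0) (PySem.List.pyGetD l j 0))))
    = ((l.zip (l.drop 1)).any (fun p => r p.1 p.2)) := by
  rw [Bool.eq_iff_iff, pvQuadAnyIff r R hr, pvZipAnyIff r R hr, List.isChain_iff_pairwise]

-- ===== VERDICT (by name: the statement is the Claim_ definition above) =====
theorem is_sorted_and_how_spec : Claim_equal_is_sorted_and_how := by
  intro arr _
  unfold Spec_is_sorted_and_how is_sorted_and_how is_sorted_and_how_alt
  have hslice : PySem.List.slice arr (some 1) none = arr.drop 1 := by
    simpa using PySem.List.slice_from arr (a := 1) (by norm_num)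
  simp only [hslice, pvFoldPairOr, Bool.false_or, pvFoldIfOr, pvInnerGT_eq_any, pvInnerLT_eq_any]
  have h1 := pvCheckEq (fun a b => decide (a > b)) (fun a b : Int => a ≤ b)
    (by intro a b; simp) arr
  have h2 := pvCheckEq (fun a b => decide (a < b)) (fun a b : Int => b ≤ a)
    (by intro a b; simp) arr
  simp only [] at h1 h2
  rw [h1, h2]
  cases (arr.zip (List.drop 1 arr)).any (fun p => decide (p.1 > p.2)) <;>
    cases (arr.zip (List.drop 1 arr)).any (fun p => decide (p.1 < p.2)) <;> rfl
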